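-- pv_equiv track=rewrite | github.com/ednira/cnets_project | flt/flt_dep_graph.py | best_dependency
-- ===== SOURCE A (Python) =====
-- def best_dependency(dependency_dict):
--     """Create a nested dictionary of all keys in activity_total and their best successor candidates, where the activity is the outer, the successor activity is the inner key and the dependency measure is the inner value"""
--
--     best_dependency = {}
--
--     for key,value in dependency_dict.items():
--         best={k:v for k,v in value.items() if v==max(value.values()) and v > 0}
--         if key not in best_dependency:
--             best_dependency[key] = {}
--         best_dependency[key] = best
--
--     return best_dependency
-- ===== SOURCE B (Python) =====
-- def best_dependency(dependency_dict):
--     result = {}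
--     for key, value in dependency_dict.items():
--         best = None
--         candidates = {}
--         for k, v in value.items():
--             if best is None or v > best:
--                 best = v
--                 candidates = {k: v}
--             elif v == best:
--                 candidates[k] = v
--         result[key] = candidates if best is not None and best > 0 else {}
--     return result
-- ===== Notes on version B (the rewrite author's own statement) =====
-- stated objective: alternative
-- what changed: A recomputes max(value.values()) inside the dict-comprehension condition for every item (a nested scan); B makes one pass per inner dict keeping a running best value and the dict of current maximizers (reset on a new strict max, append on a tie), applying the >0 test once at the end.
import Mathlib
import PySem

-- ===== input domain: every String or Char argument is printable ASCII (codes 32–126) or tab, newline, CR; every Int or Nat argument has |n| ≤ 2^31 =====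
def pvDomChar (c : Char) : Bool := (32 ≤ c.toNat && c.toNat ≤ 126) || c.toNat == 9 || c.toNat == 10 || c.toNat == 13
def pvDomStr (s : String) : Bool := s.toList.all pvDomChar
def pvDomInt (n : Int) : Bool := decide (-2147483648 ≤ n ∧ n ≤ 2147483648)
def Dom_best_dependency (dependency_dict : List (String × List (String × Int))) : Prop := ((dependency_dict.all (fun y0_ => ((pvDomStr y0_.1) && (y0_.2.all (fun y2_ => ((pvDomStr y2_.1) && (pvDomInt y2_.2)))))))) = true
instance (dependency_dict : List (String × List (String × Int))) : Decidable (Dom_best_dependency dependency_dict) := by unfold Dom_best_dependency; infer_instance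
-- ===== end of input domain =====

-- B replaces A's per-item recomputation of max(value.values()) by a single running-max pass per inner dict.

-- ===== PORT A =====
-- literal port: dicts are PySem.Dict built from the association lists; the comprehension's
-- max(value.values()) is re-evaluated for every item, exactly as in the Python.
def best_dependency (dependency_dict : List (String × List (String × Int))) : List (String × List (String × Int)) :=
  ((PySem.Dict.ofList dependency_dict).items.foldl
    (fun bd kv =>
      let value : PySem.Dict String Int := PySem.Dict.ofList kv.2
      let best : PySem.Dict String Int := value.items.foldl
        (fun b p => if PySem.List.max? value.values (fun y => y) = some p.2 ∧ p.2 > 0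
                    then b.insert p.1 p.2 else b)
        PySem.Dict.empty
      let bd := if bd.contains kv.1 then bd else bd.insert kv.1 ([] : List (String × Int))
      bd.insert kv.1 best.items)
    (PySem.Dict.empty : PySem.Dict String (List (String × Int)))).items

-- ===== PORT B =====
-- one pass over the inner dict: running best value and the dict of its current maximizers.
def bd_scan (pairs : List (String × Int)) : Option Int × PySem.Dict String Int :=
  pairs.foldl
    (fun st p =>
      match st.1 with
      | none => (some p.2, (PySem.Dict.empty : PySem.Dict String Int).insert p.1 p.2)
      | some b =>
        if p.2 > b then (some p.2, (PySem.Dict.empty : PySem.Dict String Int).insert p.1 p.2)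
        else if p.2 = b then (some b, st.2.insert p.1 p.2)
        else st)
    (none, PySem.Dict.empty)

def best_dependency_alt (dependency_dict : List (String × List (String × Int))) : List (String × List (String × Int)) :=
  ((PySem.Dict.ofList dependency_dict).items.foldl
    (fun r kv =>
      let st := bd_scan (PySem.Dict.ofList kv.2).items
      r.insert kv.1
        (match st.1 with
         | some b => if b > 0 then st.2.items else []
         | none => []))
    (PySem.Dict.empty : PySem.Dict String (List (String × Int)))).items

-- ===== PRECONDITION & SPEC =====
def Spec_best_dependency (dependency_dict : List (String × List (String × Int))) (out : List (String × List (String × Int))) : Prop := out = best_dependency_alt dependency_dict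
instance (dependency_dict : List (String × List (String × Int))) (out : List (String × List (String × Int))) : Decidable (Spec_best_dependency dependency_dict out) := by unfold Spec_best_dependency; infer_instance

-- ===== CLAIM (what is proved, stated in full; the proofs are below) =====
def Claim_equal_best_dependency : Prop := ∀ (dependency_dict : List (String × List (String × Int))), Dom_best_dependency dependency_dict → Spec_best_dependency dependency_dict (best_dependency dependency_dict)

-- ===== LEMMAS AND PROOFS =====

-- the common shape both inner loops reduce to: insert exactly the pairs whose value is M
def filt (M : Int) (t : List (String × Int)) (c : PySem.Dict String Int) : PySem.Dict String Int :=
  t.foldl (fun c' p => if p.2 = M then c'.insert p.1 p.2 else c') c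

lemma le_foldl_max' (t : List Int) (b : Int) : b ≤ t.foldl max b := by
  induction t generalizing b with
  | nil => simp
  | cons x xs ih => exact le_trans (le_max_left b x) (ih (max b x))

lemma scan_go (t : List (String × Int)) (b : Int) (c : PySem.Dict String Int) :
    t.foldl
      (fun st p =>
        match st.1 with
        | none => (some p.2, (PySem.Dict.empty : PySem.Dict String Int).insert p.1 p.2)
        | some b =>
          if p.2 > b then (some p.2, (PySem.Dict.empty : PySem.Dict String Int).insert p.1 p.2)
          else if p.2 = b then (some b, st.2.insert p.1 p.2)
          else st)
      (some b, c)
    = (some ((t.map Prod.snd).foldl max b),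
       filt ((t.map Prod.snd).foldl max b) t
         (if (t.map Prod.snd).foldl max b = b then c else PySem.Dict.empty)) := by
  induction t generalizing b c with
  | nil => simp [filt]
  | cons p t ih =>
    obtain ⟨k, v⟩ := p
    by_cases hgt : v > b
    · have hmax : max b v = v := by omega
      simp only [List.foldl_cons, List.map_cons, hmax]
      rw [if_pos hgt]
      rw [ih v _]
      have hM : b < (t.map Prod.snd).foldl max v := lt_of_lt_of_le hgt (le_foldl_max' _ v)
      have hne : (t.map Prod.snd).foldl max v ≠ b := by omega
      rw [if_neg hne]
      simp only [filt, List.foldl_cons]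
      by_cases hvM : v = (t.map Prod.snd).foldl max v
      · rw [if_pos hvM.symm, if_pos hvM]
      · rw [if_neg (fun h => hvM h.symm), if_neg hvM]
    · by_cases heq : v = b
      · have hmax : max b v = b := by omega
        simp only [List.foldl_cons, List.map_cons, hmax]
        rw [if_neg hgt, if_pos heq]
        rw [ih b _]
        simp only [filt, List.foldl_cons]
        by_cases hMb : (t.map Prod.snd).foldl max b = b
        · rw [if_pos hMb, if_pos hMb, if_pos (by omega : v = (t.map Prod.snd).foldl max b)]
        · rw [if_neg hMb, if_neg hMb, if_neg (by omega : ¬ v = (t.map Prod.snd).foldl max b)]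
      · have hlt : v < b := by omega
        have hmax : max b v = b := by omega
        simp only [List.foldl_cons, List.map_cons, hmax]
        rw [if_neg hgt, if_neg heq]
        rw [ih b c]
        have hM : b ≤ (t.map Prod.snd).foldl max b := le_foldl_max' _ b
        have hvM : v ≠ (t.map Prod.snd).foldl max b := by omega
        simp only [filt, List.foldl_cons]
        rw [if_neg hvM]

lemma foldl_if_false (t : List (String × Int)) (f : PySem.Dict String Int → String × Int → PySem.Dict String Int)
    (cond : String × Int → Prop) [DecidablePred cond] (h : ∀ p, ¬ cond p) (c : PySem.Dict String Int) :
    t.foldl (fun c' p => if cond p then f c' p else c') c = c := by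
  induction t generalizing c with
  | nil => rfl
  | cons p t ih => simp only [List.foldl_cons, if_neg (h p)]; exact ih c

lemma inner_eq (l : List (String × Int)) :
    (l.foldl
      (fun b p => if PySem.List.max? (l.map Prod.snd) (fun y => y) = some p.2 ∧ p.2 > 0
                  then b.insert p.1 p.2 else b)
      (PySem.Dict.empty : PySem.Dict String Int)).items
    = (match (bd_scan l).1 with
       | some b => if b > 0 then (bd_scan l).2.items else []
       | none => []) := by
  cases l with
  | nil => simp [bd_scan, PySem.Dict.empty]
  | cons p t =>
    obtain ⟨k, v⟩ := p
    have hmax : PySem.List.max? ((( k, v) :: t).map Prod.snd) (fun y => y)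
        = some ((t.map Prod.snd).foldl max v) := by
      simp [PySem.List.max?_id_cons]
    set M := (t.map Prod.snd).foldl max v with hM
    have hscan : bd_scan ((k, v) :: t)
        = (some M, filt M t (if M = v then (PySem.Dict.empty : PySem.Dict String Int).insert k v
                             else PySem.Dict.empty)) := by
      simp only [bd_scan, List.foldl_cons]
      exact scan_go t v _
    rw [hscan]
    simp only
    by_cases hpos : M > 0
    · rw [if_pos hpos]
      -- A's condition reduces pointwise to p.2 = M
      have hA : ∀ (c : PySem.Dict String Int),
          ((k, v) :: t).foldl
            (fun b p => if PySem.List.max? (((k, v) :: t).map Prod.snd) (fun y => y) = some p.2 ∧ p.2 > 0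
                        then b.insert p.1 p.2 else b) c
          = ((k, v) :: t).foldl (fun b p => if p.2 = M then b.insert p.1 p.2 else b) c := by
        intro c
        apply PySem.List.foldl_congr_mem
        intro b p _
        rw [hmax]
        by_cases h : p.2 = M
        · rw [if_pos ⟨by rw [h], by omega⟩, if_pos h]
        · rw [if_neg (fun hc => h (Option.some.inj hc.1).symm), if_neg h]
      rw [hA]
      simp only [List.foldl_cons, filt]
      by_cases hvM : v = M
      · rw [if_pos hvM, if_pos hvM.symm]
      · rw [if_neg hvM, if_neg (fun h => hvM h.symm)]
    · rw [if_neg hpos]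
      rw [foldl_if_false _ _ _ (fun p => by
        rw [hmax]
        rintro ⟨h1, h2⟩
        exact hpos (by have := Option.some.inj h1; omega)) PySem.Dict.empty]
      simp [PySem.Dict.empty]

lemma outer_step_eq (bd : PySem.Dict String (List (String × Int))) (kv : String × List (String × Int)) :
    (let value : PySem.Dict String Int := PySem.Dict.ofList kv.2
     let best : PySem.Dict String Int := value.items.foldl
       (fun b p => if PySem.List.max? value.values (fun y => y) = some p.2 ∧ p.2 > 0
                   then b.insert p.1 p.2 else b)
       PySem.Dict.empty
     let bd := if bd.contains kv.1 then bd else bd.insert kv.1 ([] : List (String × Int))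
     bd.insert kv.1 best.items)
    = (let st := bd_scan (PySem.Dict.ofList kv.2).items
       bd.insert kv.1
         (match st.1 with
          | some b => if b > 0 then st.2.items else []
          | none => [])) := by
  have hvals : (PySem.Dict.ofList kv.2).values = (PySem.Dict.ofList kv.2).items.map Prod.snd := rfl
  simp only [hvals]
  rw [← inner_eq (PySem.Dict.ofList kv.2).items]
  by_cases h : bd.contains kv.1
  · simp only [if_pos h]
  · simp only [if_neg h, PySem.Dict.insert_insert_self]

-- ===== VERDICT (by name: the statement is the Claim_ definition above) =====
theorem best_dependency_spec : Claim_equal_best_dependency := by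
  intro dd _
  unfold Spec_best_dependency best_dependency best_dependency_alt
  congr 1
  apply PySem.List.foldl_congr_mem
  intro bd kv _
  exact outer_step_eq bd kv
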